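-- pv_equiv track=rewrite | github.com/henrikesarat01/ANA-NOVO-PROJETO | src/ana_saga_cli/sales/commercial_pricing_policy.py | _select_pricing_variable
-- ===== SOURCE A (Python) =====
-- from typing import Any
--
-- def _clean_text(value: Any) -> str:
--     return str(value or "").strip()
--
-- def _unique_list(items: list[str]) -> list[str]:
--     unique: list[str] = []
--     seen = set()
--     for item in items:
--         value = _clean_text(item)
--         if not value or value in seen:
--             continue
--         seen.add(value)
--         unique.append(value)
--     return unique
--
-- def _select_pricing_variable(
--
--     pricing_validation: dict[str, Any],
--     variable_contracts: dict[str, dict[str, str | bool]],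
-- ) -> tuple[str, list[str], list[str]]:
--     minimum_required = [item for item in pricing_validation.get("minimum_required_variables", []) if item in variable_contracts]
--     preferred_sequence = [item for item in pricing_validation.get("preferred_question_sequence", []) if item in variable_contracts]
--     optional_relevant = [item for item in pricing_validation.get("optional_but_relevant_variables", []) if item in variable_contracts]
--     variables_that_change_price = [item for item in pricing_validation.get("variables_that_change_price", []) if item in variable_contracts]
--
--     def missing(items: list[str]) -> list[str]:
--         return [item for item in items if not bool(variable_contracts[item].get("known", False))]
--
--     minimum_missing = missing(minimum_required)
--     all_missing = missing(_unique_list(minimum_required + optional_relevant + variables_that_change_price))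
--
--     selection_order = preferred_sequence or minimum_required or all_missing
--     selected = ""
--     for variable_name in selection_order:
--         if variable_name in minimum_missing:
--             selected = variable_name
--             break
--     if not selected:
--         for variable_name in selection_order:
--             if variable_name in all_missing:
--                 selected = variable_name
--                 break
--     if not selected and all_missing:
--         selected = all_missing[0]
--     return selected, minimum_missing, all_missing
-- ===== SOURCE B (Python) =====
-- def _select_pricing_variable(
--     pricing_validation,
--     variable_contracts,
-- ):
--     def listed(field):
--         return [x for x in pricing_validation.get(field, []) if x in variable_contracts]
--
--     def unk(name):
--         return not bool(variable_contracts[name].get("known", False))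
--
--     minimum_required = listed("minimum_required_variables")
--     preferred_sequence = listed("preferred_question_sequence")
--     pool = minimum_required + listed("optional_but_relevant_variables") + listed("variables_that_change_price")
--
--     minimum_missing = [x for x in minimum_required if unk(x)]
--     cleaned = [str(x or "").strip() for x in pool]
--     all_missing = [c for i, c in enumerate(cleaned) if c and c not in cleaned[:i] and unk(c)]
--
--     selection_order = preferred_sequence or minimum_required or all_missing
--     pos = {}
--     for i, name in enumerate(selection_order):
--         pos.setdefault(name, i)
--     min_hits = [pos[n] for n in minimum_missing if n in pos]
--     all_hits = [pos[n] for n in all_missing if n in pos]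
--     selected = (
--         (selection_order[min(min_hits)] if min_hits else "")
--         or (selection_order[min(all_hits)] if all_hits else "")
--         or (all_missing[0] if all_missing else "")
--     )
--     return selected, minimum_missing, all_missing
-- ===== Notes on version B (the rewrite author's own statement) =====
-- stated objective: alternative
-- what changed: B inverts the selection: instead of scanning selection_order testing membership in the missing lists (twice, as A does), it builds a first-occurrence index map over selection_order once and picks the minimum index reached from minimum_missing, then from all_missing; dedup is done by first-occurrence test against the cleaned prefix (enumerate + slice) instead of A's unique-list/seen-set loop.
import Mathlib
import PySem

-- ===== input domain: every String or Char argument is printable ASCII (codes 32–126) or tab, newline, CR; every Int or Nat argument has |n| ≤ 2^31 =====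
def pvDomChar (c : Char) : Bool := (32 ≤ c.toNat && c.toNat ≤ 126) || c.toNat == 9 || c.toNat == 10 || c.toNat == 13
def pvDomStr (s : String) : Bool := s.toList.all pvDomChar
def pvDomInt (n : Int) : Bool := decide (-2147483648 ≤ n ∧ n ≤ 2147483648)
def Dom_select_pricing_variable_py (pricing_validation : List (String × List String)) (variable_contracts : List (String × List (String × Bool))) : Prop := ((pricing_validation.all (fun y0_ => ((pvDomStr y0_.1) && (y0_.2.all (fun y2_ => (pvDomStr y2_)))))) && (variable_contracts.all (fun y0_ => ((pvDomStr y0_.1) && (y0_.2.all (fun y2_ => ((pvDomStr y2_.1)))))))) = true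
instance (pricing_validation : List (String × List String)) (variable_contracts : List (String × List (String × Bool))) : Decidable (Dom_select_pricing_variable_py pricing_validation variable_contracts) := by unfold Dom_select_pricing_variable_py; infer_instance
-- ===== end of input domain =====

-- B inverts the selection (a first-occurrence index map over selection_order + minimum index
-- reached from each missing list, instead of A's two membership scans) and dedups by a
-- first-occurrence prefix test instead of A's seen-set loop; objective: alternative.

-- Shared dict primitives (dict[K,V] is an assoc list, lookup = first match)
def pvAlGet? {β : Type} (d : List (String × β)) (k : String) : Option β :=
  (d.find? (fun p => p.1 == k)).map (·.2)

def pvHasKey {β : Type} (d : List (String × β)) (k : String) : Bool :=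
  d.any (fun p => p.1 == k)

-- not bool(variable_contracts[item].get("known", False)) — identical test in A and B
def pvUnk (vc : List (String × List (String × Bool))) (n : String) : Bool :=
  ! (pvAlGet? ((pvAlGet? vc n).getD []) "known").getD false

-- ===== PORT A =====
-- _clean_text(value) = str(value or "").strip(); on a str argument `value or ""` is the identity
def pvCleanText (v : String) : String := PySem.Str.strip v

-- the `missing` helper: [item for item in items if not bool(vc[item].get("known", False))]
def pvMissing (vc : List (String × List (String × Bool))) (items : List String) : List String :=
  items.filter (fun item => pvUnk vc item)

-- _unique_list: loop keeping `unique` list and `seen` set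
def pvUniqueStep (st : List String × PySem.Set String) (item : String) : List String × PySem.Set String :=
  let value := pvCleanText item
  if value = "" ∨ PySem.Set.contains st.2 value then st
  else (st.1 ++ [value], PySem.Set.add st.2 value)

def pvUniqueList (items : List String) : List String :=
  (items.foldl pvUniqueStep ([], PySem.Set.empty)).1

-- A's `for v in selection_order: if v in target: selected = v; break` loop ("" if no hit)
def pvScanFor (target : List String) : List String → String
  | [] => ""
  | v :: rest => if target.contains v then v else pvScanFor target rest

def select_pricing_variable_py (pricing_validation : List (String × List String)) (variable_contracts : List (String × List (String × Bool))) : String × List String × List String :=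
  let minimum_required := ((pvAlGet? pricing_validation "minimum_required_variables").getD []).filter (fun item => pvHasKey variable_contracts item)
  let preferred_sequence := ((pvAlGet? pricing_validation "preferred_question_sequence").getD []).filter (fun item => pvHasKey variable_contracts item)
  let optional_relevant := ((pvAlGet? pricing_validation "optional_but_relevant_variables").getD []).filter (fun item => pvHasKey variable_contracts item)
  let variables_that_change_price := ((pvAlGet? pricing_validation "variables_that_change_price").getD []).filter (fun item => pvHasKey variable_contracts item)
  let minimum_missing := pvMissing variable_contracts minimum_required
  let all_missing := pvMissing variable_contracts (pvUniqueList (minimum_required ++ optional_relevant ++ variables_that_change_price))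
  let selection_order := if preferred_sequence ≠ [] then preferred_sequence else if minimum_required ≠ [] then minimum_required else all_missing
  let selected := pvScanFor minimum_missing selection_order
  let selected := if selected = "" then pvScanFor all_missing selection_order else selected
  let selected := if selected = "" ∧ all_missing ≠ [] then all_missing.headD "" else selected
  (selected, minimum_missing, all_missing)

-- ===== PORT B =====
-- pos = {}; for i, name in enumerate(selection_order): pos.setdefault(name, i)
def pvPosMap (order : List String) : PySem.Dict String Nat :=
  order.zipIdx.foldl (fun d ci => d.setdefault ci.1 ci.2) PySem.Dict.empty

def select_pricing_variable_py_alt (pricing_validation : List (String × List String)) (variable_contracts : List (String × List (String × Bool))) : String × List String × List String :=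
  let listed := fun field => ((pvAlGet? pricing_validation field).getD []).filter (fun x => pvHasKey variable_contracts x)
  let minimum_required := listed "minimum_required_variables"
  let preferred_sequence := listed "preferred_question_sequence"
  let pool := minimum_required ++ listed "optional_but_relevant_variables" ++ listed "variables_that_change_price"
  let minimum_missing := minimum_required.filter (fun x => pvUnk variable_contracts x)
  let cleaned := pool.map PySem.Str.strip
  -- [c for i, c in enumerate(cleaned) if c and c not in cleaned[:i] and unk(c)]; cleaned[:i] with 0 ≤ i is take i (exact)
  let all_missing := cleaned.zipIdx.filterMap (fun ci =>
      if ci.1 ≠ "" ∧ ci.1 ∉ cleaned.take ci.2 ∧ pvUnk variable_contracts ci.1 then some ci.1 else none)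
  let selection_order := if preferred_sequence ≠ [] then preferred_sequence else if minimum_required ≠ [] then minimum_required else all_missing
  let pos := pvPosMap selection_order
  let min_hits := minimum_missing.filterMap (fun n => pos.get? n)
  let all_hits := all_missing.filterMap (fun n => pos.get? n)
  -- selection_order[min(hits)] — the index is a first-occurrence position, always in range, so getD is exact
  let selA := match PySem.List.min? min_hits (fun x => x) with | some j => selection_order.getD j "" | none => ""
  let selB := match PySem.List.min? all_hits (fun x => x) with | some j => selection_order.getD j "" | none => ""
  let selected := if selA ≠ "" then selA else if selB ≠ "" then selB else if all_missing ≠ [] then all_missing.headD "" else ""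
  (selected, minimum_missing, all_missing)

-- ===== PRECONDITION & SPEC =====
-- Pre_ excludes exactly the inputs where Python A raises KeyError: a listed variable accepted by the
-- key filter whose stripped form is non-empty yet is not itself a key of variable_contracts (B raises there too).
def Pre_select_pricing_variable_py (pricing_validation : List (String × List String)) (variable_contracts : List (String × List (String × Bool))) : Prop :=
  ∀ x ∈ ((((pricing_validation.find? (fun p => p.1 == "minimum_required_variables")).map (·.2)).getD []).filter (fun i => variable_contracts.any (fun p => p.1 == i))
      ++ ((((pricing_validation.find? (fun p => p.1 == "optional_but_relevant_variables")).map (·.2)).getD []).filter (fun i => variable_contracts.any (fun p => p.1 == i)))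
      ++ ((((pricing_validation.find? (fun p => p.1 == "variables_that_change_price")).map (·.2)).getD []).filter (fun i => variable_contracts.any (fun p => p.1 == i)))),
    PySem.Str.strip x = "" ∨ variable_contracts.any (fun p => p.1 == PySem.Str.strip x) = true
instance (pricing_validation : List (String × List String)) (variable_contracts : List (String × List (String × Bool))) : Decidable (Pre_select_pricing_variable_py pricing_validation variable_contracts) := by unfold Pre_select_pricing_variable_py; infer_instance

def pvWitness_select_pricing_variable_py : (List (String × List String)) × (List (String × List (String × Bool))) :=
  ([("minimum_required_variables", ["seats", "term"]), ("preferred_question_sequence", ["term"])],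
   [("seats", [("known", true)]), ("term", [("known", false)])])

def Spec_select_pricing_variable_py (pricing_validation : List (String × List String)) (variable_contracts : List (String × List (String × Bool))) (out : String × List String × List String) : Prop := out = select_pricing_variable_py_alt pricing_validation variable_contracts
instance (pricing_validation : List (String × List String)) (variable_contracts : List (String × List (String × Bool))) (out : String × List String × List String) : Decidable (Spec_select_pricing_variable_py pricing_validation variable_contracts out) := by unfold Spec_select_pricing_variable_py; infer_instance

-- ===== CLAIM (what is proved, stated in full; the proofs are below) =====
def Claim_equal_select_pricing_variable_py : Prop := ∀ (pricing_validation : List (String × List String)) (variable_contracts : List (String × List (String × Bool))), Dom_select_pricing_variable_py pricing_validation variable_contracts → Pre_select_pricing_variable_py pricing_validation variable_contracts → Spec_select_pricing_variable_py pricing_validation variable_contracts (select_pricing_variable_py pricing_validation variable_contracts)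

-- ===== LEMMAS AND PROOFS =====

-- common specification of the deduplicated cleaned list, with an explicit seen-prefix
def specUniq (seen : List String) : List String → List String
  | [] => []
  | c :: cs => if c ≠ "" ∧ c ∉ seen then c :: specUniq (seen ++ [c]) cs else specUniq (seen ++ [c]) cs

-- first-occurrence index specification
def firstIdx (n : String) : List String → Option Nat
  | [] => none
  | c :: cs => if c = n then some 0 else (firstIdx n cs).map (· + 1)

lemma uniq_foldl_spec (l : List String) (u seen : List String)
    (h : ∀ v, v ≠ "" → (v ∈ u ↔ v ∈ seen)) :
    (l.foldl pvUniqueStep (u, u)).1 = u ++ specUniq seen (l.map PySem.Str.strip) := by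
  induction l generalizing u seen with
  | nil => simp [specUniq]
  | cons x xs ih =>
    simp only [List.foldl_cons, List.map_cons, specUniq]
    by_cases hv : PySem.Str.strip x = ""
    · have hstep : pvUniqueStep (u, u) x = (u, u) := by
        simp [pvUniqueStep, pvCleanText, hv]
      rw [hstep, ih u (seen ++ [PySem.Str.strip x]) ?_]
      · simp [hv]
      · intro v hvne
        rw [h v hvne]
        simp [List.mem_append]
        intro hveq; exact absurd (hveq ▸ hv) hvne
    · by_cases hm : PySem.Str.strip x ∈ u
      · have hstep : pvUniqueStep (u, u) x = (u, u) := by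
          simp [pvUniqueStep, pvCleanText, hv, PySem.Set.contains, hm]
        have hseen : PySem.Str.strip x ∈ seen := (h _ hv).1 hm
        rw [hstep, ih u (seen ++ [PySem.Str.strip x]) ?_]
        · simp [hv, hseen]
        · intro v hvne
          rw [h v hvne]
          constructor
          · intro hs; exact List.mem_append_left _ hs
          · intro hs
            rcases List.mem_append.1 hs with hs | hs
            · exact hs
            · simp at hs; exact hs ▸ hseen
      · have hns : PySem.Str.strip x ∉ seen := fun hc => hm ((h _ hv).2 hc)
        have hstep : pvUniqueStep (u, u) x = (u ++ [PySem.Str.strip x], u ++ [PySem.Str.strip x]) := by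
          simp [pvUniqueStep, pvCleanText, hv, PySem.Set.contains, hm, PySem.Set.add]
        rw [hstep, ih (u ++ [PySem.Str.strip x]) (seen ++ [PySem.Str.strip x]) ?_]
        · simp [hv, hns]
        · intro v hvne
          simp only [List.mem_append, List.mem_singleton]
          rw [h v hvne]

lemma pvUniqueList_eq_specUniq (l : List String) :
    pvUniqueList l = specUniq [] (l.map PySem.Str.strip) := by
  simpa [PySem.Set.empty] using uniq_foldl_spec l [] [] (by simp)

lemma zipIdx_filterMap_spec (vc : List (String × List (String × Bool))) :
    ∀ (rest pre cleaned : List String), cleaned = pre ++ rest →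
    ((rest.zipIdx pre.length).filterMap (fun ci =>
        if ci.1 ≠ "" ∧ ci.1 ∉ cleaned.take ci.2 ∧ pvUnk vc ci.1 then some ci.1 else none))
      = (specUniq pre rest).filter (fun c => pvUnk vc c) := by
  intro rest
  induction rest with
  | nil => intro pre cleaned h; simp [specUniq]
  | cons c cs ih =>
    intro pre cleaned h
    have htake : cleaned.take pre.length = pre := by
      subst h; simp
    have hrec := ih (pre ++ [c]) cleaned (by simp [h])
    simp only [List.length_append, List.length_cons, List.length_nil] at hrec
    simp only [List.zipIdx_cons, List.filterMap_cons, htake, specUniq]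
    by_cases hc : c = ""
    · simp [hc, hrec]
    · by_cases hp : c ∈ pre
      · simp [hc, hp, hrec]
      · by_cases h2 : pvUnk vc c
        · simp [hc, hp, h2, hrec]
        · simp [hc, hp, h2, hrec]

-- the two all_missing computations agree
lemma all_missing_eq (vc : List (String × List (String × Bool))) (pool : List String) :
    pvMissing vc (pvUniqueList pool)
      = ((pool.map PySem.Str.strip).zipIdx.filterMap (fun ci =>
          if ci.1 ≠ "" ∧ ci.1 ∉ (pool.map PySem.Str.strip).take ci.2 ∧ pvUnk vc ci.1 then some ci.1 else none)) := by
  rw [pvUniqueList_eq_specUniq, pvMissing]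
  exact (zipIdx_filterMap_spec vc (pool.map PySem.Str.strip) [] _ (by simp)).symm

-- pos lookup is the first-occurrence index
lemma posMap_get? (order : List String) :
    ∀ (k : Nat) (d : PySem.Dict String Nat) (n : String),
    ((order.zipIdx k).foldl (fun d ci => d.setdefault ci.1 ci.2) d).get? n
      = (d.get? n).or ((firstIdx n order).map (· + k)) := by
  induction order with
  | nil => intro k d n; simp [firstIdx]
  | cons c cs ih =>
    intro k d n
    simp only [List.zipIdx_cons, List.foldl_cons, firstIdx]
    rw [ih (k + 1) (d.setdefault c k) n]
    by_cases hn : c = n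
    · subst hn
      rw [PySem.Dict.get?_setdefault_self]
      simp only [if_pos rfl]
      cases hd : d.get? c with
      | none => simp [Option.or]
      | some v => simp [Option.or]
    · rw [PySem.Dict.get?_setdefault_of_ne _ _ (fun h => hn h.symm)]
      simp only [if_neg hn, Option.map_map]
      congr 1
      cases firstIdx n cs with
      | none => rfl
      | some j => simp; omega

lemma posMap_get?_eq_firstIdx (order : List String) (n : String) :
    (pvPosMap order).get? n = firstIdx n order := by
  rw [pvPosMap, posMap_get? order 0 PySem.Dict.empty n]
  simp

-- min over (+1)-shifted hits
lemma min?_map_succ (l : List Nat) :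
    PySem.List.min? (l.map (· + 1)) (fun x => x) = (PySem.List.min? l (fun x => x)).map (· + 1) := by
  cases l with
  | nil => simp [PySem.List.min?]
  | cons x t =>
    simp only [List.map_cons, PySem.List.min?_id_cons, Option.map_some]
    congr 1
    induction t generalizing x with
    | nil => rfl
    | cons y t ih =>
      simp only [List.map_cons, List.foldl_cons]
      rw [show min (x + 1) (y + 1) = min x y + 1 by omega, ih (min x y)]

-- B's inverted selection equals A's scan
lemma inverted_scan_eq (target order : List String) :
    (match PySem.List.min? (target.filterMap (fun n => firstIdx n order)) (fun x => x) with
     | some j => order.getD j ""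
     | none => "") = pvScanFor target order := by
  induction order with
  | nil =>
    have h0 : target.filterMap (fun n => firstIdx n ([] : List String)) = [] := by
      simp [firstIdx]
    simp [h0, pvScanFor, PySem.List.min?]
  | cons o os ih =>
    by_cases ho : o ∈ target
    · have h0 : (0 : Nat) ∈ target.filterMap (fun n => firstIdx n (o :: os)) := by
        refine List.mem_filterMap.2 ⟨o, ho, ?_⟩
        simp [firstIdx]
      rcases hmin : PySem.List.min? (target.filterMap (fun n => firstIdx n (o :: os))) (fun x => x) with _ | m
      · rw [PySem.List.min?_eq_none_iff] at hmin
        rw [hmin] at h0; cases h0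
      · have hm0 : m = 0 := Nat.le_zero.1 (PySem.List.min?_isMin hmin 0 h0)
        subst hm0
        simp [pvScanFor, ho]
    · have hfm : target.filterMap (fun n => firstIdx n (o :: os))
          = (target.filterMap (fun n => firstIdx n os)).map (· + 1) := by
        rw [List.map_filterMap]
        refine List.filterMap_congr ?_
        intro n hn
        have : ¬ o = n := fun h => ho (h ▸ hn)
        simp [firstIdx, this]
      rw [hfm, min?_map_succ]
      have hscan : pvScanFor target (o :: os) = pvScanFor target os := by
        simp [pvScanFor, ho]
      rw [hscan, ← ih]
      cases PySem.List.min? (target.filterMap (fun n => firstIdx n os)) (fun x => x) with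
      | none => rfl
      | some j => simp [List.getD]

-- the full selection chains agree
lemma select_chain_eq (minM allM order : List String) :
    (let selected := pvScanFor minM order
     let selected := if selected = "" then pvScanFor allM order else selected
     if selected = "" ∧ allM ≠ [] then allM.headD "" else selected)
    = (let selA := match PySem.List.min? (minM.filterMap (fun n => (pvPosMap order).get? n)) (fun x => x) with
         | some j => order.getD j "" | none => ""
       let selB := match PySem.List.min? (allM.filterMap (fun n => (pvPosMap order).get? n)) (fun x => x) with
         | some j => order.getD j "" | none => ""
       if selA ≠ "" then selA else if selB ≠ "" then selB else if allM ≠ [] then allM.headD "" else "") := by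
  have hpos : ∀ (t : List String), t.filterMap (fun n => (pvPosMap order).get? n)
      = t.filterMap (fun n => firstIdx n order) := by
    intro t; exact List.filterMap_congr (fun n _ => posMap_get?_eq_firstIdx order n)
  simp only [hpos, inverted_scan_eq]
  by_cases h1 : pvScanFor minM order = "" <;>
    by_cases h2 : pvScanFor allM order = "" <;>
    by_cases h3 : allM = [] <;>
    simp [h1, h2, h3]

theorem pv_ports_equal (pricing_validation : List (String × List String)) (variable_contracts : List (String × List (String × Bool))) :
    select_pricing_variable_py pricing_validation variable_contracts
      = select_pricing_variable_py_alt pricing_validation variable_contracts := by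
  unfold select_pricing_variable_py select_pricing_variable_py_alt
  simp only [all_missing_eq, List.append_assoc]
  have hmm : pvMissing variable_contracts
      (((pvAlGet? pricing_validation "minimum_required_variables").getD []).filter (fun item => pvHasKey variable_contracts item))
      = (((pvAlGet? pricing_validation "minimum_required_variables").getD []).filter (fun item => pvHasKey variable_contracts item)).filter (fun x => pvUnk variable_contracts x) := rfl
  rw [hmm]
  exact congrArg (fun s => (s, _, _)) (select_chain_eq _ _ _)

-- ===== VERDICT (by name: the statement is the Claim_ definition above) =====
theorem select_pricing_variable_py_spec : Claim_equal_select_pricing_variable_py := by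
  intro pv vc _ _
  unfold Spec_select_pricing_variable_py
  exact pv_ports_equal pv vc
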